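-- pv_equiv track=rewrite | github.com/HimanshuLadva/Python-DSA | Leetcode/daily/20251031.py | getSneakyNumbersV1
-- ===== SOURCE A (Python) =====
-- from typing import List
--
-- def getSneakyNumbersV1(nums: List[int]) -> List[int]:
--     lookup = {}
--     result = []
--     for x in nums:
--         if x not in lookup:
--             lookup[x] = 0
--         lookup[x] += 1
--
--         if lookup[x] == 2:
--             result.append(x)
--
--     return result
-- ===== SOURCE B (Python) =====
-- from typing import List
--
-- def getSneakyNumbersV1(nums: List[int]) -> List[int]:
--     positions = {}
--     for i, x in enumerate(nums):
--         positions.setdefault(x, []).append(i)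
--     pairs = [(ixs[1], x) for x, ixs in positions.items() if len(ixs) >= 2]
--     pairs.sort(key=lambda p: p[0])
--     return [x for _, x in pairs]
-- ===== Notes on version B (the rewrite author's own statement) =====
-- stated objective: alternative
-- what changed: Replaces the streaming counter loop (emit when a count reaches 2) by index gathering: group all occurrence indices per value in one pass, take each value's second index, sort the (second-index, value) pairs, and output the values.
import Mathlib
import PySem

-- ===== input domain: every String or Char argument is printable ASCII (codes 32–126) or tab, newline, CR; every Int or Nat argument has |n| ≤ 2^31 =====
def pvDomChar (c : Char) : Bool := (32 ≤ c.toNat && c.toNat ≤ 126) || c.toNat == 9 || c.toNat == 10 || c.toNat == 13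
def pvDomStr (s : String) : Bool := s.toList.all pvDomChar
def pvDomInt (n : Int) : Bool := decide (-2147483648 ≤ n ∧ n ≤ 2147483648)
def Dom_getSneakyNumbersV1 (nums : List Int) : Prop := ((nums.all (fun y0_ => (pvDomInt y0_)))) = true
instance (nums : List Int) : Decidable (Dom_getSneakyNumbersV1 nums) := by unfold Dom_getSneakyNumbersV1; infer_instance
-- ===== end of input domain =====

-- B replaces A's streaming counter loop by index gathering: one pass groups each value's
-- occurrence indices, then the (second-index, value) pairs are sorted and the values emitted;
-- objective: alternative (a genuinely different decomposition of the same task).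

-- ===== PORT A =====
def getSneakyNumbersV1 (nums : List Int) : List Int :=
  (nums.foldl (fun (st : PySem.Dict Int Int × List Int) x =>
    let lookup := if st.1.contains x then st.1 else st.1.insert x 0
    let lookup := lookup.insert x (lookup.getD x 0 + 1)
    let result := if lookup.getD x 0 == 2 then st.2 ++ [x] else st.2
    (lookup, result)) (PySem.Dict.empty, [])).2

-- ===== PORT B =====
def getSneakyNumbersV1_alt (nums : List Int) : List Int :=
  let positions := (PySem.List.enumerate nums 0).foldl
      (fun (d : PySem.Dict Int (List Int)) p => d.modify p.2 [] (· ++ [p.1])) PySem.Dict.empty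
  let pairs := positions.items.filterMap (fun q =>
      if 2 ≤ q.2.length then some (PySem.List.pyGetD q.2 1 0, q.1) else none)
  let pairs := PySem.List.sorted pairs (fun p => p.1)
  pairs.map (fun p => p.2)

-- ===== PRECONDITION & SPEC =====
def Spec_getSneakyNumbersV1 (nums : List Int) (out : List Int) : Prop := out = getSneakyNumbersV1_alt nums
instance (nums : List Int) (out : List Int) : Decidable (Spec_getSneakyNumbersV1 nums out) := by unfold Spec_getSneakyNumbersV1; infer_instance

-- ===== CLAIM (what is proved, stated in full; the proofs are below) =====
def Claim_equal_getSneakyNumbersV1 : Prop := ∀ (nums : List Int), Dom_getSneakyNumbersV1 nums → Spec_getSneakyNumbersV1 nums (getSneakyNumbersV1 nums)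

-- ===== LEMMAS AND PROOFS =====

-- The common specification, read off the stream: walking l with already-seen prefix pre,
-- emit the pair (index, x) when x occurred exactly once in the prefix.
def pvPairsSpec (pre l : List Int) : List (Int × Int) :=
  match l with
  | [] => []
  | x :: xs => (if pre.count x = 1 then [((pre.length : Int), x)] else []) ++ pvPairsSpec (pre ++ [x]) xs

-- occurrence indices of v in l, counting from s
def pvIdxs (v : Int) (s : Int) : List Int → List Int
  | [] => []
  | x :: xs => (if x = v then [s] else []) ++ pvIdxs v (s + 1) xs

-- ---------- A-side ----------
lemma pvA_aux (l : List Int) : ∀ (d : PySem.Dict Int Int) (res pre : List Int),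
    (∀ y, d.getD y 0 = (pre.count y : Int)) →
    (l.foldl (fun (st : PySem.Dict Int Int × List Int) x =>
      let lookup := if st.1.contains x then st.1 else st.1.insert x 0
      let lookup := lookup.insert x (lookup.getD x 0 + 1)
      let result := if lookup.getD x 0 == 2 then st.2 ++ [x] else st.2
      (lookup, result)) (d, res)).2 = res ++ (pvPairsSpec pre l).map (fun p => p.2) := by
  induction l with
  | nil => intro d res pre _; simp [pvPairsSpec]
  | cons x xs ih =>
    intro d res pre hd
    have hx : (if d.contains x then d else d.insert x 0).getD x 0 = (pre.count x : Int) := by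
      by_cases hc : d.contains x
      · simp [hc, hd x]
      · simp only [Bool.not_eq_true] at hc
        rw [if_neg (by simp [hc]), PySem.Dict.getD_insert_self, ← hd x,
            PySem.Dict.getD_of_not_contains d 0 hc]
    have h1 : ∀ y, (if d.contains x then d else d.insert x 0).getD y 0 = (pre.count y : Int) := by
      intro y
      by_cases hyx : y = x
      · subst hyx; exact hx
      · by_cases hc : d.contains x
        · simp [hc, hd y]
        · simp only [Bool.not_eq_true] at hc
          rw [if_neg (by simp [hc]), PySem.Dict.getD_insert, if_neg hyx, hd y]
    have h2 : ∀ y, ((if d.contains x then d else d.insert x 0).insert x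
        ((if d.contains x then d else d.insert x 0).getD x 0 + 1)).getD y 0
        = ((pre ++ [x]).count y : Int) := by
      intro y
      rw [PySem.Dict.getD_insert]
      by_cases hyx : y = x
      · subst hyx; simp [hx, List.count_append]
      · rw [if_neg hyx, h1 y]
        simp [List.count_append, Ne.symm hyx]
    simp only [List.foldl_cons]
    rw [ih _ _ (pre ++ [x]) h2]
    by_cases h : pre.count x = 1
    · simp [pvPairsSpec, h, hx, PySem.Dict.getD_insert_self]
    · have hne : ¬ ((pre.count x : Int) + 1 = 2) := by omega
      simp [pvPairsSpec, hx, PySem.Dict.getD_insert_self, hne, h]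

lemma pvA_eq (nums : List Int) :
    getSneakyNumbersV1 nums = (pvPairsSpec [] nums).map (fun p => p.2) := by
  unfold getSneakyNumbersV1
  rw [pvA_aux nums PySem.Dict.empty [] []]
  · simp
  · intro y; simp [PySem.Dict.getD_empty]

-- ---------- B-side: the grouping dict ----------
lemma pvIdxs_eq_filter (v : Int) (l : List Int) : ∀ s : Int,
    (((PySem.List.enumerate l s).map (fun p => (p.2, p.1))).filter
        (fun q => q.1 == v)).map (fun q => q.2) = pvIdxs v s l := by
  induction l with
  | nil => intro s; simp [PySem.List.enumerate_nil, pvIdxs]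
  | cons x xs ih =>
    intro s
    rw [PySem.List.enumerate_cons]
    by_cases h : x = v
    · simp [pvIdxs, h, ih (s + 1)]
    · simp [pvIdxs, h, ih (s + 1)]

lemma pvPositions_getD (nums : List Int) (v : Int) :
    (((PySem.List.enumerate nums 0).foldl
      (fun (d : PySem.Dict Int (List Int)) p => d.modify p.2 [] (· ++ [p.1]))
      PySem.Dict.empty).getD v []) = pvIdxs v 0 nums := by
  have h := PySem.Dict.getD_foldl_modify_append
    ((PySem.List.enumerate nums 0).map (fun p => (p.2, p.1)))
    (PySem.Dict.empty : PySem.Dict Int (List Int)) v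
  rw [List.foldl_map] at h
  simpa [PySem.Dict.getD_empty, pvIdxs_eq_filter] using h

lemma pvPositions_keys (nums : List Int) :
    (((PySem.List.enumerate nums 0).foldl
      (fun (d : PySem.Dict Int (List Int)) p => d.modify p.2 [] (· ++ [p.1]))
      PySem.Dict.empty).keys) = PySem.Set.ofList nums := by
  have h := PySem.Dict.keys_foldl_modify_key (PySem.List.enumerate nums 0)
    (fun p => p.2) ([] : List Int) (fun _ p => (· ++ [p.1])) PySem.Dict.empty
  simpa [PySem.Dict.keys_empty, PySem.Set.update_nil_left, PySem.List.map_snd_enumerate] using h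

-- ---------- index-list facts ----------
lemma pvIdxs_length (v : Int) (l : List Int) : ∀ s, (pvIdxs v s l).length = l.count v := by
  induction l with
  | nil => intro s; simp [pvIdxs]
  | cons x xs ih =>
    intro s
    by_cases h : x = v <;> simp [pvIdxs, h, ih (s + 1)]

lemma pvIdxs_head? (v : Int) (l : List Int) : ∀ (s k : Int),
    ((pvIdxs v s l)[0]? = some k ↔
      ∃ j : Nat, l[j]? = some v ∧ k = s + (j : Int) ∧ (l.take j).count v = 0) := by
  induction l with
  | nil => intro s k; simp [pvIdxs]
  | cons x xs ih =>
    intro s k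
    by_cases h : x = v
    · subst h
      simp only [pvIdxs, if_true, List.singleton_append, List.getElem?_cons_zero]
      constructor
      · intro hk
        exact ⟨0, rfl, by simpa using (Option.some_inj.mp hk).symm, by simp⟩
      · rintro ⟨j, hj, hk, hcnt⟩
        match j with
        | 0 => simp [hk]
        | j + 1 => simp at hcnt
    · simp only [pvIdxs, if_neg h, List.nil_append]
      rw [ih (s + 1) k]
      constructor
      · rintro ⟨j, hj, hk, hcnt⟩
        exact ⟨j + 1, by simpa using hj, by push_cast; omega, by simp [h, hcnt]⟩
      · rintro ⟨j, hj, hk, hcnt⟩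
        match j with
        | 0 => simp at hj; exact absurd hj h
        | j + 1 =>
          refine ⟨j, by simpa using hj, by push_cast at hk; omega, ?_⟩
          simpa [List.count_cons, h] using hcnt

lemma pvIdxs_second? (v : Int) (l : List Int) : ∀ (s k : Int),
    ((pvIdxs v s l)[1]? = some k ↔
      ∃ j : Nat, l[j]? = some v ∧ k = s + (j : Int) ∧ (l.take j).count v = 1) := by
  induction l with
  | nil => intro s k; simp [pvIdxs]
  | cons x xs ih =>
    intro s k
    by_cases h : x = v
    · subst h
      simp only [pvIdxs, if_true, List.singleton_append, List.getElem?_cons_succ]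
      rw [pvIdxs_head? x xs (s + 1) k]
      constructor
      · rintro ⟨j, hj, hk, hcnt⟩
        exact ⟨j + 1, by simpa using hj, by push_cast; omega, by simp [hcnt]⟩
      · rintro ⟨j, hj, hk, hcnt⟩
        match j with
        | 0 => simp at hcnt
        | j + 1 =>
          refine ⟨j, by simpa using hj, by push_cast at hk; omega, ?_⟩
          simpa [List.count_cons] using hcnt
    · simp only [pvIdxs, if_neg h, List.nil_append]
      rw [ih (s + 1) k]
      constructor
      · rintro ⟨j, hj, hk, hcnt⟩
        exact ⟨j + 1, by simpa using hj, by push_cast; omega, by simp [h, hcnt]⟩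
      · rintro ⟨j, hj, hk, hcnt⟩
        match j with
        | 0 => simp at hj; exact absurd hj h
        | j + 1 =>
          refine ⟨j, by simpa using hj, by push_cast at hk; omega, ?_⟩
          simpa [List.count_cons, h] using hcnt

-- ---------- pvPairsSpec facts ----------
lemma mem_pvPairsSpec (l : List Int) : ∀ (pre : List Int) (p : Int × Int),
    (p ∈ pvPairsSpec pre l ↔
      ∃ j : Nat, l[j]? = some p.2 ∧ p.1 = (pre.length : Int) + (j : Int) ∧
        (pre ++ l.take j).count p.2 = 1) := by
  induction l with
  | nil => intro pre p; simp [pvPairsSpec]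
  | cons x xs ih =>
    intro pre p
    simp only [pvPairsSpec, List.mem_append]
    constructor
    · intro hmem
      rcases hmem with hmem | hmem
      · have hx : pre.count x = 1 ∧ p = ((pre.length : Int), x) := by
          by_cases h : pre.count x = 1
          · exact ⟨h, by simpa [h] using hmem⟩
          · simp [h] at hmem
        refine ⟨0, ?_, ?_, ?_⟩
        · simp [hx.2]
        · simp [hx.2]
        · simp [hx.2, hx.1]
      · rcases (ih (pre ++ [x]) p).mp hmem with ⟨j, hj, hk, hcnt⟩
        refine ⟨j + 1, by simpa using hj, by simp at hk ⊢; omega, ?_⟩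
        simpa [List.append_assoc] using hcnt
    · rintro ⟨j, hj, hk, hcnt⟩
      match j with
      | 0 =>
        simp only [List.getElem?_cons_zero, Option.some_inj] at hj
        simp only [List.take_zero, List.append_nil] at hcnt
        left
        rw [← hj] at hcnt
        rw [if_pos hcnt]
        have hp : p = ((pre.length : Int), x) := Prod.ext (by simpa using hk) hj.symm
        simp [hp]
      | j + 1 =>
        right
        refine (ih (pre ++ [x]) p).mpr ⟨j, by simpa using hj, by simp at hk ⊢; omega, ?_⟩
        simpa [List.append_assoc] using hcnt

lemma pvPairsSpec_fst_ge (l : List Int) : ∀ (pre : List Int) (p : Int × Int),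
    p ∈ pvPairsSpec pre l → (pre.length : Int) ≤ p.1 := by
  intro pre p hp
  rcases (mem_pvPairsSpec l pre p).mp hp with ⟨j, _, hk, _⟩
  omega

lemma pvPairsSpec_pairwise (l : List Int) : ∀ (pre : List Int),
    (pvPairsSpec pre l).Pairwise (fun a b => a.1 < b.1) := by
  induction l with
  | nil => intro pre; simp [pvPairsSpec]
  | cons x xs ih =>
    intro pre
    simp only [pvPairsSpec]
    rw [List.pairwise_append]
    refine ⟨?_, ih (pre ++ [x]), ?_⟩
    · by_cases h : pre.count x = 1 <;> simp [h]
    · intro a ha b hb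
      have hb' := pvPairsSpec_fst_ge xs (pre ++ [x]) b hb
      have ha' : a.1 = (pre.length : Int) := by
        by_cases h : pre.count x = 1
        · simp [h] at ha; simp [ha]
        · simp [h] at ha
      simp only [List.length_append, List.length_cons, List.length_nil] at hb'
      omega

lemma pvPairsSpec_nodup (l : List Int) (pre : List Int) : (pvPairsSpec pre l).Nodup :=
  (pvPairsSpec_pairwise l pre).imp (fun h => by intro he; rw [he] at h; omega)

-- membership characterization shared by both sides
lemma mem_pvPairsSpec_iff_second (nums : List Int) (p : Int × Int) :
    p ∈ pvPairsSpec [] nums ↔ (pvIdxs p.2 0 nums)[1]? = some p.1 := by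
  rw [mem_pvPairsSpec, pvIdxs_second?]
  simp

-- ---------- B's pair list ----------
lemma pvB_pairs_eq (nums : List Int) :
    (((PySem.List.enumerate nums 0).foldl
      (fun (d : PySem.Dict Int (List Int)) p => d.modify p.2 [] (· ++ [p.1]))
      PySem.Dict.empty).items.filterMap (fun q =>
        if 2 ≤ q.2.length then some (PySem.List.pyGetD q.2 1 0, q.1) else none))
    = (PySem.Set.ofList nums).filterMap (fun v =>
        if 2 ≤ (pvIdxs v 0 nums).length then
          some (PySem.List.pyGetD (pvIdxs v 0 nums) 1 0, v) else none) := by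
  have hnd : (((PySem.List.enumerate nums 0).foldl
      (fun (d : PySem.Dict Int (List Int)) p => d.modify p.2 [] (· ++ [p.1]))
      PySem.Dict.empty).keys).Nodup := by
    apply PySem.Dict.nodup_keys_foldl_modify_key
    simp [PySem.Dict.keys_empty]
  rw [PySem.Dict.items_eq_map_keys _ hnd [], List.filterMap_map, pvPositions_keys]
  apply List.filterMap_congr
  intro v _
  simp [pvPositions_getD]

lemma pvB_pairs_nodup (nums : List Int) : ∀ (s : List Int), s.Nodup →
    (s.filterMap (fun v =>
        if 2 ≤ (pvIdxs v 0 nums).length then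
          some (PySem.List.pyGetD (pvIdxs v 0 nums) 1 0, v) else none)).Nodup := by
  intro s
  induction s with
  | nil => intro _; simp
  | cons v s ihs =>
    intro hset
    rcases List.nodup_cons.mp hset with ⟨hv, hs⟩
    rw [List.filterMap_cons]
    have hsnd : ∀ p ∈ s.filterMap (fun v =>
        if 2 ≤ (pvIdxs v 0 nums).length then
          some (PySem.List.pyGetD (pvIdxs v 0 nums) 1 0, v) else none), p.2 ∈ s := by
      intro p hp
      rcases List.mem_filterMap.mp hp with ⟨w, hw, hf⟩
      by_cases h : 2 ≤ (pvIdxs w 0 nums).length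
      · rw [if_pos h, Option.some_inj] at hf
        rw [← hf]
        exact hw
      · rw [if_neg h] at hf
        simp at hf
    by_cases h : 2 ≤ (pvIdxs v 0 nums).length
    · rw [if_pos h]
      refine List.nodup_cons.mpr ⟨?_, ihs hs⟩
      intro hmem
      exact hv (by simpa using hsnd _ hmem)
    · rw [if_neg h]
      exact ihs hs

lemma pvB_mem_pairs (nums : List Int) (p : Int × Int) :
    (p ∈ (PySem.Set.ofList nums).filterMap (fun v =>
        if 2 ≤ (pvIdxs v 0 nums).length then
          some (PySem.List.pyGetD (pvIdxs v 0 nums) 1 0, v) else none))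
    ↔ (pvIdxs p.2 0 nums)[1]? = some p.1 := by
  constructor
  · intro hp
    rcases List.mem_filterMap.mp hp with ⟨v, _, hf⟩
    by_cases h : 2 ≤ (pvIdxs v 0 nums).length
    · rw [if_pos h, Option.some_inj] at hf
      subst hf
      have h1 : (1 : Nat) < (pvIdxs v 0 nums).length := by omega
      have hg := PySem.List.pyGetD_ofNat (pvIdxs v 0 nums) 1 0 h1
      simp only []
      rw [List.getElem?_eq_getElem h1]
      simpa using hg.symm
    · rw [if_neg h] at hf
      simp at hf
  · intro hp
    have hlen : (1 : Nat) < (pvIdxs p.2 0 nums).length := by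
      by_contra hc
      rw [List.getElem?_eq_none_iff.mpr (by omega)] at hp
      simp at hp
    have hmem : p.2 ∈ nums := by
      have : nums.count p.2 ≠ 0 := by
        rw [← pvIdxs_length p.2 nums 0]; omega
      exact List.count_pos_iff.mp (Nat.pos_of_ne_zero this)
    refine List.mem_filterMap.mpr ⟨p.2, (PySem.Set.mem_ofList _ _).mpr hmem, ?_⟩
    rw [if_pos (by omega)]
    have hget : PySem.List.pyGetD (pvIdxs p.2 0 nums) 1 0 = (pvIdxs p.2 0 nums)[1] := by
      have := PySem.List.pyGetD_ofNat (pvIdxs p.2 0 nums) 1 0 hlen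
      simpa using this
    rw [List.getElem?_eq_getElem hlen, Option.some_inj] at hp
    simp [hget, hp]

lemma pvB_eq (nums : List Int) :
    getSneakyNumbersV1_alt nums = (pvPairsSpec [] nums).map (fun p => p.2) := by
  unfold getSneakyNumbersV1_alt
  simp only [pvB_pairs_eq]
  congr 1
  apply PySem.List.sorted_eq_of_perm_of_pairwise_lt
  · rw [List.perm_ext_iff_of_nodup (pvPairsSpec_nodup nums []) (pvB_pairs_nodup nums _ (PySem.Set.nodup_ofList nums))]
    intro p
    rw [mem_pvPairsSpec_iff_second, pvB_mem_pairs]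
  · exact pvPairsSpec_pairwise nums []

-- ===== VERDICT (by name: the statement is the Claim_ definition above) =====
theorem getSneakyNumbersV1_spec : Claim_equal_getSneakyNumbersV1 := by
  intro nums _
  unfold Spec_getSneakyNumbersV1
  rw [pvA_eq, pvB_eq]
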